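-- pv_equiv track=rewrite | github.com/1hedu/pyCryptoChart2Wav | chart_png_to_wave.py | find_baseline
-- ===== SOURCE A (Python) =====
-- def find_baseline(mask, w, h):
--     """
--     Baseline = row with the highest count of blue pixels.
--     """
--     best_row = 0
--     best_count = -1
--     for y in range(h):
--         count = 0
--         row = mask[y]
--         for x in range(w):
--             if row[x]:
--                 count += 1
--         if count > best_count:
--             best_count = count
--             best_row = y
--     return best_row
-- ===== SOURCE B (Python) =====
-- def find_baseline(mask, w, h):
--     """
--     Baseline = row with the highest count of blue pixels.
--     Sort-then-select: stably sort the row indices by descending pixel count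
--     (zip with range(w) truncates each row to its first w pixels), then take
--     the head; stability makes the head the FIRST row with the maximal count.
--     """
--     rows = sorted(range(h),
--                   key=lambda y: -sum(1 for v, _ in zip(mask[y], range(w)) if v))
--     return rows[0] if rows else 0
-- ===== Notes on version B (the rewrite author's own statement) =====
-- stated objective: alternative
-- what changed: Replaces the single tracking pass (mutable best_row/best_count, strict '>' update) by sort-then-select: row indices are stably sorted by descending pixel count (rows truncated to width w via zip with range(w)) and the head of the sorted order is returned; stability of Python's sort reproduces the first-maximal tie-break.
import Mathlib
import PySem

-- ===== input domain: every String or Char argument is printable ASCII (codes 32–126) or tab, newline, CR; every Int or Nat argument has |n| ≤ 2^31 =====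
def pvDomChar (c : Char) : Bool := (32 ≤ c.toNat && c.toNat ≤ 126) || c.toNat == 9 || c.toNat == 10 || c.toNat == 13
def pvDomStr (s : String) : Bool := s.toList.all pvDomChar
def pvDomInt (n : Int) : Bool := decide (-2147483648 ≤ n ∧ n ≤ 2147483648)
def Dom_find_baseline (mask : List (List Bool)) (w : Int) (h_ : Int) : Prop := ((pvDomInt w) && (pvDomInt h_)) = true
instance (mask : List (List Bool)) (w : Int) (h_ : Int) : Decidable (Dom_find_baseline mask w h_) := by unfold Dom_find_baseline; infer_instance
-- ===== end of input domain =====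

-- B replaces A's single tracking pass (mutable best_row/best_count, strict '>')
-- by sort-then-select: row indices stably sorted by descending pixel count
-- (rows truncated to width w by zip with range(w)), head of the order returned.


-- ===== PORT A =====
def find_baseline (mask : List (List Bool)) (w : Int) (h_ : Int) : Int :=
  ((PySem.List.pyRange 0 h_ 1).foldl
    (fun (st : Int × Int) y =>
      let row := PySem.List.pyGetD mask y []
      let count := (PySem.List.pyRange 0 w 1).foldl
        (fun c x => if PySem.List.pyGetD row x false then c + 1 else c) (0 : Int)
      if count > st.2 then (y, count) else st)
    ((0 : Int), (-1 : Int))).1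

-- ===== PORT B =====
def find_baseline_alt (mask : List (List Bool)) (w : Int) (h_ : Int) : Int :=
  let rows := PySem.List.sorted (PySem.List.pyRange 0 h_ 1)
    (fun y => -(((PySem.List.pyGetD mask y []).zip (PySem.List.pyRange 0 w 1)).map
        (fun p => if p.1 then (1 : Int) else 0)).sum)
  match rows with
  | [] => 0
  | r :: _ => r

-- ===== PRECONDITION & SPEC =====
-- Pre_ excludes exactly the inputs on which the Python A raises IndexError:
-- h beyond the number of rows, or a scanned row shorter than w.
def Pre_find_baseline (mask : List (List Bool)) (w : Int) (h_ : Int) : Prop :=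
  h_ ≤ (mask.length : Int) ∧ ∀ row ∈ mask.take h_.toNat, w ≤ (row.length : Int)
instance (mask : List (List Bool)) (w : Int) (h_ : Int) : Decidable (Pre_find_baseline mask w h_) := by unfold Pre_find_baseline; infer_instance

def pvWitness_find_baseline : List (List Bool) × Int × Int := ([[true, false], [true, true]], 2, 2)

def Spec_find_baseline (mask : List (List Bool)) (w : Int) (h_ : Int) (out : Int) : Prop := out = find_baseline_alt mask w h_
instance (mask : List (List Bool)) (w : Int) (h_ : Int) (out : Int) : Decidable (Spec_find_baseline mask w h_ out) := by unfold Spec_find_baseline; infer_instance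

-- ===== CLAIM (what is proved, stated in full; the proofs are below) =====
def Claim_equal_find_baseline : Prop := ∀ (mask : List (List Bool)) (w : Int) (h_ : Int), Dom_find_baseline mask w h_ → Pre_find_baseline mask w h_ → Spec_find_baseline mask w h_ (find_baseline mask w h_)

-- ===== LEMMAS AND PROOFS =====

-- B's per-row count (proof-side abbreviation; definitionally the port's key, negated)
def pvG (mask : List (List Bool)) (w : Int) (y : Int) : Int :=
  (((PySem.List.pyGetD mask y []).zip (PySem.List.pyRange 0 w 1)).map
      (fun p => if p.1 then (1 : Int) else 0)).sum

-- the option-valued 'first argmax so far' step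
def pvStep {α : Type} (bef : α → α → Bool) (h : Option α) (x : α) : Option α :=
  match h with
  | none => some x
  | some y => if bef x y then some x else some y

theorem pv_head?_insertBy {α : Type} (bef : α → α → Bool) (x : α) (ys : List α) :
    (PySem.List.insertBy bef x ys).head? = pvStep bef ys.head? x := by
  cases ys with
  | nil => rfl
  | cons y ys =>
    by_cases h : bef x y <;> simp [PySem.List.insertBy, pvStep, h]

theorem pv_head?_foldl_insertBy {α : Type} (bef : α → α → Bool) (L : List α) :
    ∀ acc : List α,
    (L.foldl (fun acc x => PySem.List.insertBy bef x acc) acc).head?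
      = L.foldl (pvStep bef) acc.head? := by
  induction L with
  | nil => intro acc; rfl
  | cons x L ih =>
    intro acc
    rw [List.foldl_cons, List.foldl_cons, ih, pv_head?_insertBy]

-- from a 'some' state the two loops move in lockstep
theorem pv_fold_someA (g : Int → Int) (L : List Int) :
    ∀ r : Int, ∃ s,
    L.foldl (pvStep (fun a b => decide (g b < g a))) (some r) = some s ∧
    L.foldl (fun (st : Int × Int) y => if g y > st.2 then (y, g y) else st) (r, g r) = (s, g s) := by
  induction L with
  | nil => intro r; exact ⟨r, rfl, rfl⟩
  | cons x L ih =>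
    intro r
    by_cases h : g r < g x
    · obtain ⟨s, h1, h2⟩ := ih x
      refine ⟨s, ?_, ?_⟩
      · rw [List.foldl_cons, show pvStep (fun a b => decide (g b < g a)) (some r) x = some x by
          simp [pvStep, h], h1]
      · rw [List.foldl_cons, if_pos (by exact h), h2]
    · obtain ⟨s, h1, h2⟩ := ih r
      refine ⟨s, ?_, ?_⟩
      · rw [List.foldl_cons, show pvStep (fun a b => decide (g b < g a)) (some r) x = some r by
          simp [pvStep, h], h1]
      · rw [List.foldl_cons, if_neg (by exact h), h2]

-- A's tracking loop returns the head of the option loop, when counts are ≥ 0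
theorem pv_fold_main (g : Int → Int) (L : List Int) (hg : ∀ y ∈ L, 0 ≤ g y) :
    (L.foldl (fun (st : Int × Int) y => if g y > st.2 then (y, g y) else st) ((0 : Int), (-1 : Int))).1
      = (match L.foldl (pvStep (fun a b => decide (g b < g a))) none with
          | none => (0 : Int)
          | some r => r) := by
  cases L with
  | nil => rfl
  | cons x L =>
    have hx : 0 ≤ g x := hg x (List.mem_cons_self)
    obtain ⟨s, h1, h2⟩ := pv_fold_someA g L x
    rw [List.foldl_cons, List.foldl_cons, if_pos (by omega : g x > (-1 : Int)),
        show pvStep (fun a b => decide (g b < g a)) none x = some x from rfl, h1, h2]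

-- counting over range(n) with default-false lookup is counting the prefix
theorem pv_countP_range (row : List Bool) (n : Nat) :
    (List.range n).countP (fun i => row.getD i false) = (row.take n).countP (fun b => b) := by
  induction n with
  | zero => rfl
  | succ n ih =>
    rw [List.range_succ, List.countP_append, ih, List.take_add_one, List.countP_append]
    cases h : row[n]? with
    | none =>
      simp [List.getD, h]
    | some v =>
      simp [List.getD, h]

-- counting the true firsts of a zip is counting the prefix
theorem pv_countP_zip {α : Type} (row : List Bool) :
    ∀ (l : List α),
    (row.zip l).countP (fun p => p.1) = (row.take l.length).countP (fun b => b) := by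
  induction row with
  | nil => intro l; simp
  | cons b row ih =>
    intro l
    cases l with
    | nil => simp
    | cons a l =>
      simp only [List.zip_cons_cons, List.length_cons, List.take_succ_cons, List.countP_cons, ih]

-- the two per-row counters agree (on every input)
theorem pv_count_eq (row : List Bool) (w : Int) :
    (PySem.List.pyRange 0 w 1).foldl
      (fun c x => if PySem.List.pyGetD row x false then c + 1 else c) (0 : Int)
    = ((row.zip (PySem.List.pyRange 0 w 1)).map (fun p => if p.1 then (1 : Int) else 0)).sum := by
  rw [PySem.List.foldl_if_add_one, PySem.List.sum_map_ite_one_zero, zero_add]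
  by_cases hw : w ≤ 0
  · have h0 : PySem.List.pyRange 0 w 1 = [] := by
      simp [PySem.List.pyRange, hw]
    rw [h0]; simp
  · have hw' : w = ((w.toNat : Nat) : Int) := by omega
    rw [hw', PySem.List.pyRange_zero_natCast]
    rw [List.countP_map]
    congr 1
    calc (List.range w.toNat).countP ((fun x => PySem.List.pyGetD row x false) ∘ (fun k : Nat => (k : Int)))
        = (List.range w.toNat).countP (fun i => row.getD i false) := by
          apply List.countP_congr; intro i _; simp [Function.comp, PySem.List.pyGetD_natCast]
      _ = (row.take w.toNat).countP (fun b => b) := pv_countP_range row w.toNat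
      _ = (row.take (List.map (fun k : Nat => (k : Int)) (List.range w.toNat)).length).countP (fun b => b) := by
          simp
      _ = (row.zip (List.map (fun k : Nat => (k : Int)) (List.range w.toNat))).countP (fun p => p.1) := by
          rw [pv_countP_zip]

-- B's counts are nonnegative
theorem pv_g_nonneg (mask : List (List Bool)) (w y : Int) : 0 ≤ pvG mask w y := by
  unfold pvG
  rw [PySem.List.sum_map_ite_one_zero]
  exact Int.natCast_nonneg _

-- ===== VERDICT (by name: the statement is the Claim_ definition above) =====
theorem find_baseline_spec : Claim_equal_find_baseline := by
  intro mask w h_ _ _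
  unfold Spec_find_baseline
  have hA : find_baseline mask w h_
      = ((PySem.List.pyRange 0 h_ 1).foldl
          (fun (st : Int × Int) y => if pvG mask w y > st.2 then (y, pvG mask w y) else st)
          ((0 : Int), (-1 : Int))).1 := by
    unfold find_baseline
    congr 1
    apply PySem.List.foldl_congr_mem
    intro st y _
    simp only [pvG, pv_count_eq]
  have hB : find_baseline_alt mask w h_
      = (match (PySem.List.pyRange 0 h_ 1).foldl
            (pvStep (fun a b => decide (pvG mask w b < pvG mask w a))) none with
          | none => (0 : Int)
          | some r => r) := by
    unfold find_baseline_alt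
    have hs : PySem.List.sorted (PySem.List.pyRange 0 h_ 1) (fun y => -(pvG mask w y))
        = (PySem.List.pyRange 0 h_ 1).foldl
            (fun acc x => PySem.List.insertBy
              (fun a b => decide (-(pvG mask w a) < -(pvG mask w b))) x acc) [] :=
      PySem.List.sorted_eq_foldl_insertBy _ _
    have hh : (PySem.List.sorted (PySem.List.pyRange 0 h_ 1) (fun y => -(pvG mask w y))).head?
        = (PySem.List.pyRange 0 h_ 1).foldl
            (pvStep (fun a b => decide (pvG mask w b < pvG mask w a))) none := by
      rw [hs, pv_head?_foldl_insertBy]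
      apply PySem.List.foldl_congr_mem
      intro acc x _
      cases acc with
      | none => rfl
      | some y => simp only [pvStep, neg_lt_neg_iff]
    show (match PySem.List.sorted (PySem.List.pyRange 0 h_ 1) (fun y => -(pvG mask w y)) with
          | [] => (0 : Int)
          | r :: _ => r) = _
    rw [← hh]
    cases PySem.List.sorted (PySem.List.pyRange 0 h_ 1) (fun y => -(pvG mask w y)) <;> rfl
  rw [hA, hB]
  exact pv_fold_main (pvG mask w) _ (fun y _ => pv_g_nonneg mask w y)
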